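-- pv_equiv track=rewrite | github.com/BASE-Laboratory/BraggTrack | braggtrack/segmentation/pipeline.py | connected_components_3d
-- ===== SOURCE A (Python) =====
-- from collections import deque
-- from typing import Iterable
--
-- def _neighbors(z: int, y: int, x: int, shape: tuple[int, int, int]) -> Iterable[tuple[int, int, int]]:
--     z_max, y_max, x_max = shape
--     for dz, dy, dx in ((1, 0, 0), (-1, 0, 0), (0, 1, 0), (0, -1, 0), (0, 0, 1), (0, 0, -1)):
--         nz, ny, nx = z + dz, y + dy, x + dx
--         if 0 <= nz < z_max and 0 <= ny < y_max and 0 <= nx < x_max: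
--             yield nz, ny, nx
--
-- def connected_components_3d(mask: list[list[list[bool]]]) -> int:
--     """Count connected components in a 3D boolean mask with 6-connectivity."""
--
--     z_max = len(mask)
--     y_max = len(mask[0]) if z_max else 0
--     x_max = len(mask[0][0]) if y_max else 0
--
--     visited = set()
--     count = 0
--
--     for z in range(z_max):
--         for y in range(y_max):
--             for x in range(x_max):
--                 if not mask[z][y][x] or (z, y, x) in visited:
--                     continue
--                 count += 1
--                 queue = deque([(z, y, x)])
--                 visited.add((z, y, x))
--                 while queue:
--                     cz, cy, cx = queue.popleft()
--                     for nz, ny, nx in _neighbors(cz, cy, cx, (z_max, y_max, x_max)):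
--                         if mask[nz][ny][nx] and (nz, ny, nx) not in visited:
--                             visited.add((nz, ny, nx))
--                             queue.append((nz, ny, nx))
--
--     return count
-- ===== SOURCE B (Python) =====
-- def connected_components_3d(mask):
--     """Count connected components in a 3D boolean mask with 6-connectivity."""
--
--     z_max = len(mask)
--     y_max = len(mask[0]) if z_max else 0
--     x_max = len(mask[0][0]) if y_max else 0
--
--     # label maps each processed true cell to the lexicographically smallest
--     # cell of its connected component seen so far; merging relabels in place.
--     label = {}
--     for z in range(z_max):
--         for y in range(y_max):
--             for x in range(x_max):
--                 if not mask[z][y][x]: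
--                     continue
--                 c = (z, y, x)
--                 nls = {label[n] for n in ((z - 1, y, x), (z, y - 1, x), (z, y, x - 1))
--                        if n in label}
--                 target = min(nls | {c})
--                 label = {k: (target if v in nls else v) for k, v in label.items()}
--                 label[c] = target
--     return sum(1 for k, v in label.items() if k == v)
-- ===== Notes on version B (the rewrite author's own statement) =====
-- stated objective: alternative
-- what changed: A's per-component BFS flood fill (deque + visited set) is replaced by a single lexicographic scan that keeps a label dict mapping every true cell to the smallest cell of its component seen so far, merging labels through the three backward neighbours and finally counting self-labelled cells; no queue or per-component expansion is used.
import Mathlib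
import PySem

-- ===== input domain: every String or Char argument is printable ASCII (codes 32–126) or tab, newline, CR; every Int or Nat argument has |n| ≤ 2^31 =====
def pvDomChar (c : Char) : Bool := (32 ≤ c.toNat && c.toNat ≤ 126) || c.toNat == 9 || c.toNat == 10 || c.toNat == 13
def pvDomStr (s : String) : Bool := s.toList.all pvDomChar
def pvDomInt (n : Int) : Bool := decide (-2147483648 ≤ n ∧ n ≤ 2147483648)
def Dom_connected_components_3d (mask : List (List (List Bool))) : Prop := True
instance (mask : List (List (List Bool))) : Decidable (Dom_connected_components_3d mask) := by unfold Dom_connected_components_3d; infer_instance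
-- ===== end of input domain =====

-- B replaces A's BFS flood fill (queue + visited set) by a single scan that merges
-- component labels through backward neighbours and counts self-labelled cells (objective: alternative).

abbrev PvCell := Int × Int × Int

-- ===== PORT A =====
-- mask[z][y][x]; exact wherever the three indexes are in range — both ports only read it
-- under the bounds guards their Pythons perform, and Pre_ excludes ragged masks
def pvMaskAt (mask : List (List (List Bool))) (z y x : Int) : Bool :=
  (PySem.List.pyGet? ((PySem.List.pyGet? ((PySem.List.pyGet? mask z).getD []) y).getD []) x).getD false

def pvDeltas : List (Int × Int × Int) := [(1,0,0),(-1,0,0),(0,1,0),(0,-1,0),(0,0,1),(0,0,-1)]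

-- A's _neighbors generator, as the list it yields
def pvNeighbors (z y x zm ym xm : Int) : List PvCell :=
  pvDeltas.filterMap (fun d =>
    let nz := z + d.1
    let ny := y + d.2.1
    let nx := x + d.2.2
    if 0 ≤ nz ∧ nz < zm ∧ 0 ≤ ny ∧ ny < ym ∧ 0 ≤ nx ∧ nx < xm then some (nz, ny, nx) else none)

-- body of A's inner 'for nz, ny, nx in _neighbors(...)' loop
def pvBfsStep (mask : List (List (List Bool))) (st : List PvCell × List PvCell) (n : PvCell) :
    List PvCell × List PvCell :=
  if pvMaskAt mask n.1 n.2.1 n.2.2 ∧ n ∉ st.2 then (st.1 ++ [n], PySem.Set.add st.2 n) else st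

-- A's 'while queue' loop; the fuel only bounds the iteration count (2*box+1 always suffices, proved below)
def pvBfs (mask : List (List (List Bool))) (zm ym xm : Int) :
    Nat → List PvCell → List PvCell → List PvCell
  | 0, _, vis => vis
  | _ + 1, [], vis => vis
  | fuel + 1, c :: queue, vis =>
      let st := (pvNeighbors c.1 c.2.1 c.2.2 zm ym xm).foldl (pvBfsStep mask) (queue, vis)
      pvBfs mask zm ym xm fuel st.1 st.2

-- body of A's innermost scan step, state = (visited, count)
def pvAStep (mask : List (List (List Bool))) (zm ym xm : Int)
    (st : List PvCell × Int) (c : PvCell) : List PvCell × Int :=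
  if ¬ pvMaskAt mask c.1 c.2.1 c.2.2 ∨ c ∈ st.1 then st
  else
    (pvBfs mask zm ym xm (2 * (zm * ym * xm).toNat + 1) [c] (PySem.Set.add st.1 c), st.2 + 1)

def connected_components_3d (mask : List (List (List Bool))) : Int :=
  let z_max : Int := mask.length
  let y_max : Int := if z_max ≠ 0 then (((PySem.List.pyGet? mask 0).getD []).length : Int) else 0
  let x_max : Int := if y_max ≠ 0 then
      (((PySem.List.pyGet? ((PySem.List.pyGet? mask 0).getD []) 0).getD []).length : Int) else 0
  let st := (PySem.List.pyRange 0 z_max 1).foldl (fun st z =>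
    (PySem.List.pyRange 0 y_max 1).foldl (fun st y =>
      (PySem.List.pyRange 0 x_max 1).foldl
        (fun st x => pvAStep mask z_max y_max x_max st (z, y, x)) st) st)
    (([] : List PvCell), (0 : Int))
  st.2

-- ===== PORT B =====
-- Python tuple comparison (z, y, x) <= (z', y', x')
def pvCellLe (a b : PvCell) : Bool :=
  decide (a.1 < b.1 ∨ (a.1 = b.1 ∧ (a.2.1 < b.2.1 ∨ (a.2.1 = b.2.1 ∧ a.2.2 ≤ b.2.2))))

def pvMin2 (a b : PvCell) : PvCell := if pvCellLe b a then b else a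

-- dict lookup (first match; the keys are unique here)
def pvLookup (L : List (PvCell × PvCell)) (k : PvCell) : Option PvCell :=
  (L.find? (fun kv => kv.1 = k)).map (·.2)

-- body of B's innermost scan step, state = the label dict
def pvBStep (mask : List (List (List Bool))) (L : List (PvCell × PvCell)) (c : PvCell) :
    List (PvCell × PvCell) :=
  if ¬ pvMaskAt mask c.1 c.2.1 c.2.2 then L
  else
    let nls : List PvCell := PySem.Set.ofList
      (([(c.1 - 1, c.2.1, c.2.2), (c.1, c.2.1 - 1, c.2.2), (c.1, c.2.1, c.2.2 - 1)] : List PvCell).filterMap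
        (pvLookup L))
    let target := nls.foldl pvMin2 c
    (L.map (fun kv => if kv.2 ∈ nls then (kv.1, target) else kv)) ++ [(c, target)]

def connected_components_3d_alt (mask : List (List (List Bool))) : Int :=
  let z_max : Int := mask.length
  let y_max : Int := if z_max ≠ 0 then (((PySem.List.pyGet? mask 0).getD []).length : Int) else 0
  let x_max : Int := if y_max ≠ 0 then
      (((PySem.List.pyGet? ((PySem.List.pyGet? mask 0).getD []) 0).getD []).length : Int) else 0
  let label := (PySem.List.pyRange 0 z_max 1).foldl (fun L z =>
    (PySem.List.pyRange 0 y_max 1).foldl (fun L y =>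
      (PySem.List.pyRange 0 x_max 1).foldl (fun L x => pvBStep mask L (z, y, x)) L) L)
    ([] : List (PvCell × PvCell))
  (label.countP (fun kv => kv.1 = kv.2) : Int)

-- ===== PRECONDITION & SPEC =====
-- Exactly the masks on which the Python A returns: when x_max > 0 the scan reads
-- mask[z][y][x] for every z < len(mask), y < y_max, x < x_max, so a plane shorter than
-- y_max, or one of its first y_max rows shorter than x_max, raises IndexError (longer rows
-- and planes are ignored); when x_max = 0 no cell is ever indexed and A always returns.
def Pre_connected_components_3d (mask : List (List (List Bool))) : Prop :=
  let ym := if mask.length ≠ 0 then (mask.headD []).length else 0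
  let xm := if ym ≠ 0 then ((mask.headD []).headD []).length else 0
  xm = 0 ∨ ∀ p ∈ mask, ym ≤ p.length ∧ ∀ r ∈ p.take ym, xm ≤ r.length
instance (mask : List (List (List Bool))) : Decidable (Pre_connected_components_3d mask) := by
  unfold Pre_connected_components_3d; infer_instance

def pvWitness_connected_components_3d : List (List (List Bool)) := [[[true, false], [false, true]]]

def Spec_connected_components_3d (mask : List (List (List Bool))) (out : Int) : Prop :=
  out = connected_components_3d_alt mask
instance (mask : List (List (List Bool))) (out : Int) :
    Decidable (Spec_connected_components_3d mask out) := by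
  unfold Spec_connected_components_3d; infer_instance

-- ===== CLAIM (what is proved, stated in full; the proofs are below) =====
def Claim_equal_connected_components_3d : Prop :=
  ∀ (mask : List (List (List Bool))), Dom_connected_components_3d mask →
    Pre_connected_components_3d mask →
    Spec_connected_components_3d mask (connected_components_3d mask)

-- ===== LEMMAS AND PROOFS =====

-- classical truth value of a proposition (proof-side only)
noncomputable def pvB (p : Prop) : Bool := @decide p (Classical.propDecidable p)

theorem pvB_iff (p : Prop) : pvB p = true ↔ p := by
  unfold pvB; exact @decide_eq_true_iff p (Classical.propDecidable p)

-- strict lexicographic order on cells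
def pvLt (a b : PvCell) : Prop :=
  a.1 < b.1 ∨ (a.1 = b.1 ∧ (a.2.1 < b.2.1 ∨ (a.2.1 = b.2.1 ∧ a.2.2 < b.2.2)))

abbrev pvInBox (zm ym xm : Int) (c : PvCell) : Prop :=
  0 ≤ c.1 ∧ c.1 < zm ∧ 0 ≤ c.2.1 ∧ c.2.1 < ym ∧ 0 ≤ c.2.2 ∧ c.2.2 < xm

-- 6-connectivity neighbourhood
def pvNb (a b : PvCell) : Prop :=
  (b.1 = a.1 + 1 ∧ b.2.1 = a.2.1 ∧ b.2.2 = a.2.2) ∨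
  (b.1 = a.1 - 1 ∧ b.2.1 = a.2.1 ∧ b.2.2 = a.2.2) ∨
  (b.1 = a.1 ∧ b.2.1 = a.2.1 + 1 ∧ b.2.2 = a.2.2) ∨
  (b.1 = a.1 ∧ b.2.1 = a.2.1 - 1 ∧ b.2.2 = a.2.2) ∨
  (b.1 = a.1 ∧ b.2.1 = a.2.1 ∧ b.2.2 = a.2.2 + 1) ∨
  (b.1 = a.1 ∧ b.2.1 = a.2.1 ∧ b.2.2 = a.2.2 - 1)

-- the three context sizes the ports derive from the mask
def pvZM (mask : List (List (List Bool))) : Int := mask.length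
def pvYM (mask : List (List (List Bool))) : Int :=
  if pvZM mask ≠ 0 then (((PySem.List.pyGet? mask 0).getD []).length : Int) else 0
def pvXM (mask : List (List (List Bool))) : Int :=
  if pvYM mask ≠ 0 then
    (((PySem.List.pyGet? ((PySem.List.pyGet? mask 0).getD []) 0).getD []).length : Int) else 0

-- "true cell": in the box and set in the mask
def pvTB (mask : List (List (List Bool))) (c : PvCell) : Bool :=
  decide (pvInBox (pvZM mask) (pvYM mask) (pvXM mask) c) && pvMaskAt mask c.1 c.2.1 c.2.2

-- adjacency between true cells, full and restricted to a vertex list P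
def pvAdjF (t : PvCell → Bool) (a b : PvCell) : Prop := t a = true ∧ t b = true ∧ pvNb a b
def pvAdjP (t : PvCell → Bool) (P : List PvCell) (a b : PvCell) : Prop :=
  pvAdjF t a b ∧ a ∈ P ∧ b ∈ P
def pvConnF (t : PvCell → Bool) : PvCell → PvCell → Prop := Relation.ReflTransGen (pvAdjF t)
def pvConnP (t : PvCell → Bool) (P : List PvCell) : PvCell → PvCell → Prop :=
  Relation.ReflTransGen (pvAdjP t P)

-- the scan order of both ports
def pvCells (zm ym xm : Int) : List PvCell :=
  (PySem.List.pyRange 0 zm 1).flatMap (fun z =>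
    (PySem.List.pyRange 0 ym 1).flatMap (fun y =>
      (PySem.List.pyRange 0 xm 1).map (fun x => (z, y, x))))

-- first cell of P connected (within P) to k — the canonical label
noncomputable def pvFC (t : PvCell → Bool) (P : List PvCell) (k : PvCell) : PvCell :=
  (P.filter (fun d => t d && pvB (pvConnP t P d k))).headD k

-- c is the scan-first cell of its full component
def pvMinOf (t : PvCell → Bool) (c : PvCell) : Prop :=
  ∀ d, t d = true → pvConnF t d c → ¬ pvLt d c

-- "x is c or hangs off a backward neighbour of c inside P"
def pvBcon (t : PvCell → Bool) (P : List PvCell) (c x : PvCell) : Prop :=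
  x = c ∨ ∃ n, n ∈ P ∧ t n = true ∧ pvNb n c ∧ pvConnP t P n x

theorem pvNb_symm {a b : PvCell} (h : pvNb a b) : pvNb b a := by
  unfold pvNb at h ⊢
  rcases h with ⟨h1,h2,h3⟩|⟨h1,h2,h3⟩|⟨h1,h2,h3⟩|⟨h1,h2,h3⟩|⟨h1,h2,h3⟩|⟨h1,h2,h3⟩
  · exact Or.inr (Or.inl ⟨by omega, by omega, by omega⟩)
  · exact Or.inl ⟨by omega, by omega, by omega⟩
  · exact Or.inr (Or.inr (Or.inr (Or.inl ⟨by omega, by omega, by omega⟩)))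
  · exact Or.inr (Or.inr (Or.inl ⟨by omega, by omega, by omega⟩))
  · exact Or.inr (Or.inr (Or.inr (Or.inr (Or.inr ⟨by omega, by omega, by omega⟩))))
  · exact Or.inr (Or.inr (Or.inr (Or.inr (Or.inl ⟨by omega, by omega, by omega⟩))))
theorem pvLt_irrefl (a : PvCell) : ¬ pvLt a a := by
  unfold pvLt; omega
theorem pvLe_iff_not_lt {a b : PvCell} : pvCellLe a b = true ↔ ¬ pvLt b a := by
  unfold pvCellLe pvLt; simp only [decide_eq_true_iff]; omega
theorem pvLe_trans {a b c : PvCell} (h1 : pvCellLe a b = true) (h2 : pvCellLe b c = true) :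
    pvCellLe a c = true := by
  unfold pvCellLe at *; simp only [decide_eq_true_iff] at *; omega
theorem pvLe_total (a b : PvCell) : pvCellLe a b = true ∨ pvCellLe b a = true := by
  unfold pvCellLe; simp only [decide_eq_true_iff]; omega

theorem pvLe_refl (a : PvCell) : pvCellLe a a = true := by
  unfold pvCellLe; simp

theorem pvAdjF_symm {t : PvCell → Bool} {a b : PvCell} (h : pvAdjF t a b) : pvAdjF t b a := by
  obtain ⟨h1, h2, h3⟩ := h; exact ⟨h2, h1, pvNb_symm h3⟩

theorem pvConnP_symm {t : PvCell → Bool} {P : List PvCell} {a b : PvCell}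
    (h : pvConnP t P a b) : pvConnP t P b a := by
  refine (Relation.ReflTransGen.symmetric (fun a b hab => ?_)) h
  exact ⟨pvAdjF_symm hab.1, hab.2.2, hab.2.1⟩
theorem pvConnP_mono {t : PvCell → Bool} {P Q : List PvCell} (hPQ : ∀ x ∈ P, x ∈ Q)
    {a b : PvCell} (h : pvConnP t P a b) : pvConnP t Q a b := by
  refine Relation.ReflTransGen.mono (fun a b hab => ?_) h
  exact ⟨hab.1, hPQ _ hab.2.1, hPQ _ hab.2.2⟩
theorem pvConnP_toF {t : PvCell → Bool} {P : List PvCell} {a b : PvCell}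
    (h : pvConnP t P a b) : pvConnF t a b := by
  exact Relation.ReflTransGen.mono (fun a b hab => hab.1) h
theorem pvConnP_mem {t : PvCell → Bool} {P : List PvCell} {a b : PvCell}
    (h : pvConnP t P a b) (hne : a ≠ b) : a ∈ P ∧ b ∈ P ∧ t a = true ∧ t b = true := by
  induction h with
  | refl => exact absurd rfl hne
  | tail hab hbc ih =>
    rename_i e f
    rcases eq_or_ne a e with rfl | hae
    · exact ⟨hbc.2.1, hbc.2.2, hbc.1.1, hbc.1.2.1⟩
    · exact ⟨(ih hae).1, hbc.2.2, (ih hae).2.2.1, hbc.1.2.1⟩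

theorem pvSumConst {α : Type} (l : List α) (c : ℕ) : (l.map (fun _ => c)).sum = l.length * c := by
  induction l with
  | nil => simp
  | cons a l ih => simp [ih, Nat.succ_mul]; omega

theorem mem_pvCells {zm ym xm : Int} {c : PvCell} :
    c ∈ pvCells zm ym xm ↔ pvInBox zm ym xm c := by
  unfold pvCells
  simp only [List.mem_flatMap, List.mem_map, PySem.List.mem_pyRange_one]
  constructor
  · rintro ⟨z, ⟨hz1, hz2⟩, y, ⟨hy1, hy2⟩, x, ⟨hx1, hx2⟩, rfl⟩
    exact ⟨hz1, hz2, hy1, hy2, hx1, hx2⟩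
  · rintro ⟨h1, h2, h3, h4, h5, h6⟩
    exact ⟨c.1, ⟨h1, h2⟩, c.2.1, ⟨h3, h4⟩, c.2.2, ⟨h5, h6⟩, rfl⟩
theorem pvCells_pairwise (zm ym xm : Int) : (pvCells zm ym xm).Pairwise pvLt := by
  unfold pvCells
  refine List.pairwise_flatMap.mpr ⟨fun z hz => ?_, ?_⟩
  · refine List.pairwise_flatMap.mpr ⟨fun y hy => ?_, ?_⟩
    · exact (List.pairwise_map).mpr ((PySem.List.pairwise_lt_pyRange_one 0 xm).imp
        (fun h => by unfold pvLt; exact Or.inr ⟨rfl, Or.inr ⟨rfl, h⟩⟩))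
    · refine (PySem.List.pairwise_lt_pyRange_one 0 ym).imp ?_
      intro y1 y2 h x1 hx1 x2 hx2
      simp only [List.mem_map] at hx1 hx2
      obtain ⟨a, _, rfl⟩ := hx1; obtain ⟨b, _, rfl⟩ := hx2
      unfold pvLt; exact Or.inr ⟨rfl, Or.inl h⟩
  · refine (PySem.List.pairwise_lt_pyRange_one 0 zm).imp ?_
    intro z1 z2 h c1 hc1 c2 hc2
    simp only [List.mem_flatMap, List.mem_map] at hc1 hc2
    obtain ⟨y1, _, x1, _, rfl⟩ := hc1; obtain ⟨y2, _, x2, _, rfl⟩ := hc2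
    unfold pvLt; exact Or.inl h
theorem pvCells_nodup (zm ym xm : Int) : (pvCells zm ym xm).Nodup :=
  (pvCells_pairwise zm ym xm).imp (fun {a b} h => by intro he; subst he; exact pvLt_irrefl _ h)
theorem pvCells_length (zm ym xm : Int) :
    (pvCells zm ym xm).length ≤ (zm * ym * xm).toNat := by
  have hlen : (pvCells zm ym xm).length = zm.toNat * (ym.toNat * xm.toNat) := by
    unfold pvCells
    simp only [List.length_flatMap, List.map_map, Function.comp_def, List.length_map]
    rw [show (fun z : Int => (List.map (fun _ : Int => (PySem.List.pyRange 0 xm 1).length) (PySem.List.pyRange 0 ym 1)).sum) = (fun _ : Int => (PySem.List.pyRange 0 ym 1).length * (PySem.List.pyRange 0 xm 1).length) from funext (fun z => pvSumConst _ _), pvSumConst]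
    simp [PySem.List.length_pyRange_one]
  rw [hlen]
  by_cases h1 : zm ≤ 0
  · simp [Int.toNat_of_nonpos h1]
  by_cases h2 : ym ≤ 0
  · simp [Int.toNat_of_nonpos h2]
  by_cases h3 : xm ≤ 0
  · simp [Int.toNat_of_nonpos h3]
  have : ((zm.toNat * (ym.toNat * xm.toNat) : Nat) : Int) = zm * ym * xm := by
    push_cast
    rw [Int.toNat_of_nonneg (by omega), Int.toNat_of_nonneg (by omega), Int.toNat_of_nonneg (by omega)]
    ring
  omega

theorem pvFoldMin (c : PvCell) (ns : List PvCell) :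
    ns.foldl pvMin2 c ∈ c :: ns ∧ ∀ y ∈ c :: ns, pvCellLe (ns.foldl pvMin2 c) y = true := by
  induction ns generalizing c with
  | nil => exact ⟨List.mem_cons_self, by intro y hy; rcases List.mem_cons.1 hy with rfl | h; exact pvLe_refl y; simp at h⟩
  | cons n ns ih =>
    have hstep : List.foldl pvMin2 c (n :: ns) = List.foldl pvMin2 (pvMin2 c n) ns := rfl
    obtain ⟨hmem, hle⟩ := ih (pvMin2 c n)
    rw [hstep]
    have hm2mem : pvMin2 c n = c ∨ pvMin2 c n = n := by unfold pvMin2; split <;> simp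
    constructor
    · rcases List.mem_cons.1 hmem with he | he
      · rcases hm2mem with h | h <;> rw [he, h] <;> simp
      · simp [he]
    · intro y hy
      have hlecn : ∀ w, pvCellLe (pvMin2 c n) w = true → pvCellLe (List.foldl pvMin2 (pvMin2 c n) ns) w = true :=
        fun w hw => pvLe_trans (hle _ List.mem_cons_self) hw
      have hc : pvCellLe (pvMin2 c n) c = true := by
        unfold pvMin2; split
        · assumption
        · exact pvLe_refl c
      have hn : pvCellLe (pvMin2 c n) n = true := by
        unfold pvMin2; split
        · exact pvLe_refl n
        · rcases pvLe_total c n with h | h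
          · exact h
          · simp_all
      rcases List.mem_cons.1 hy with rfl | hy'
      · exact hlecn _ hc
      · rcases List.mem_cons.1 hy' with rfl | hy''
        · exact hlecn _ hn
        · exact hle _ (List.mem_cons_of_mem _ hy'')

theorem pvHeadD_mem {l : List PvCell} (h : l ≠ []) (d : PvCell) : l.headD d ∈ l := by
  cases l with | nil => exact absurd rfl h | cons a l => exact List.mem_cons_self
theorem pvHeadD_min {l : List PvCell} (hp : l.Pairwise pvLt) {x : PvCell} (hx : x ∈ l)
    (hmin : ∀ y ∈ l, ¬ pvLt y x) (d : PvCell) : l.headD d = x := by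
  cases l with
  | nil => exact absurd hx (List.not_mem_nil)
  | cons a l =>
    rcases List.mem_cons.1 hx with rfl | hxl
    · rfl
    · exact absurd (List.rel_of_pairwise_cons hp hxl) (hmin a List.mem_cons_self)
theorem pvHeadD_least {l : List PvCell} (hp : l.Pairwise pvLt) {y : PvCell} (hy : y ∈ l)
    (d : PvCell) : ¬ pvLt y (l.headD d) := by
  cases l with
  | nil => exact absurd hy (List.not_mem_nil)
  | cons a l =>
    rcases List.mem_cons.1 hy with rfl | hyl
    · simp only [List.headD_cons]; exact pvLt_irrefl _
    · intro hlt
      have h2 := List.rel_of_pairwise_cons hp hyl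
      simp only [List.headD_cons] at hlt
      unfold pvLt at h2 hlt; omega

theorem pvB_congr {p q : Prop} (h : p ↔ q) : pvB p = pvB q := by
  by_cases hp : p
  · rw [(pvB_iff p).mpr hp, (pvB_iff q).mpr (h.mp hp)]
  · have hq : ¬ q := fun hq => hp (h.mpr hq)
    have h1 : pvB p = false := by
      cases hb : pvB p
      · rfl
      · exact absurd ((pvB_iff p).mp hb) hp
    have h2 : pvB q = false := by
      cases hb : pvB q
      · rfl
      · exact absurd ((pvB_iff q).mp hb) hq
    rw [h1, h2]

theorem pvFC_filter_mem {t : PvCell → Bool} {P : List PvCell} {k y : PvCell} :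
    y ∈ P.filter (fun d => t d && pvB (pvConnP t P d k)) ↔
      y ∈ P ∧ t y = true ∧ pvConnP t P y k := by
  rw [List.mem_filter, Bool.and_eq_true, pvB_iff]

theorem pvFC_mem {t : PvCell → Bool} {P : List PvCell} {k : PvCell}
    (hk : k ∈ P) (ht : t k = true) :
    pvFC t P k ∈ P ∧ t (pvFC t P k) = true ∧ pvConnP t P (pvFC t P k) k := by
  have hkF : k ∈ P.filter (fun d => t d && pvB (pvConnP t P d k)) :=
    pvFC_filter_mem.mpr ⟨hk, ht, Relation.ReflTransGen.refl⟩
  have hne : P.filter (fun d => t d && pvB (pvConnP t P d k)) ≠ [] := List.ne_nil_of_mem hkF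
  have hmem := pvHeadD_mem hne k
  have h2 := pvFC_filter_mem.mp hmem
  exact ⟨h2.1, h2.2.1, h2.2.2⟩
theorem pvFC_min {t : PvCell → Bool} {P : List PvCell} (hp : P.Pairwise pvLt) {k y : PvCell}
    (hy : y ∈ P) (hty : t y = true) (hc : pvConnP t P y k) : ¬ pvLt y (pvFC t P k) := by
  have hyF : y ∈ P.filter (fun d => t d && pvB (pvConnP t P d k)) :=
    pvFC_filter_mem.mpr ⟨hy, hty, hc⟩
  exact pvHeadD_least (hp.filter _) hyF k
theorem pvFC_congr {t : PvCell → Bool} {P : List PvCell} {a b : PvCell}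
    (ha : a ∈ P) (hta : t a = true) (h : pvConnP t P a b) : pvFC t P a = pvFC t P b := by
  have hfeq : P.filter (fun d => t d && pvB (pvConnP t P d a)) =
      P.filter (fun d => t d && pvB (pvConnP t P d b)) := by
    refine List.filter_congr (fun x hx => ?_)
    cases htx : t x
    · simp
    · simp only [Bool.true_and]
      exact pvB_congr ⟨fun hc => hc.trans h, fun hc => hc.trans (pvConnP_symm h)⟩
  have haF : a ∈ P.filter (fun d => t d && pvB (pvConnP t P d a)) :=
    pvFC_filter_mem.mpr ⟨ha, hta, Relation.ReflTransGen.refl⟩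
  unfold pvFC
  rw [hfeq]
  rw [hfeq] at haF
  cases hF : P.filter (fun d => t d && pvB (pvConnP t P d b)) with
  | nil => rw [hF] at haF; exact absurd haF List.not_mem_nil
  | cons u l => simp [List.headD_cons]
theorem pvFC_iff {t : PvCell → Bool} {P : List PvCell} {a b : PvCell}
    (ha : a ∈ P) (hta : t a = true) (hb : b ∈ P) (htb : t b = true) :
    pvFC t P a = pvFC t P b ↔ pvConnP t P a b := by
  constructor
  · intro h
    have h1 := pvFC_mem ha hta
    have h2 := pvFC_mem hb htb
    exact (pvConnP_symm h1.2.2).trans (h ▸ h2.2.2)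
  · exact pvFC_congr ha hta
theorem pvFC_self_iff {t : PvCell → Bool} {P : List PvCell} (hp : P.Pairwise pvLt) {k : PvCell}
    (hk : k ∈ P) (ht : t k = true) :
    (pvFC t P k = k ↔ ∀ d ∈ P, t d = true → pvConnP t P d k → ¬ pvLt d k) := by
  constructor
  · intro hfc d hd htd hconn
    have hdF : d ∈ P.filter (fun e => t e && pvB (pvConnP t P e k)) :=
      pvFC_filter_mem.mpr ⟨hd, htd, hconn⟩
    have := pvHeadD_least (hp.filter _) hdF k
    rw [show (P.filter (fun e => t e && pvB (pvConnP t P e k))).headD k = pvFC t P k from rfl,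
      hfc] at this
    exact this
  · intro hmin
    have hkF : k ∈ P.filter (fun d => t d && pvB (pvConnP t P d k)) :=
      pvFC_filter_mem.mpr ⟨hk, ht, Relation.ReflTransGen.refl⟩
    exact pvHeadD_min (hp.filter _) hkF
      (fun y hy => by
        have h2 := pvFC_filter_mem.mp hy
        exact hmin y h2.1 h2.2.1 h2.2.2) k

theorem pvClosed_reach {t : PvCell → Bool} {V : List PvCell}
    (hcl : ∀ a ∈ V, ∀ b, pvAdjF t a b → b ∈ V) {s d : PvCell} (hs : s ∈ V)
    (h : pvConnF t s d) : d ∈ V := by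
  induction h with
  | refl => exact hs
  | tail hab hbc ih => exact hcl _ ih _ hbc

theorem pvConnP_snoc_notT {t : PvCell → Bool} {P : List PvCell} {c : PvCell}
    (htc : t c = false) {a b : PvCell} : pvConnP t (P ++ [c]) a b ↔ pvConnP t P a b := by
  constructor
  · intro h
    induction h with
    | refl => exact Relation.ReflTransGen.refl
    | tail h1 hadj ih =>
      rename_i k b
      obtain ⟨⟨htk, htb, hnb⟩, hkm, hbm⟩ := hadj
      have hkc : k ≠ c := fun he => by rw [he, htc] at htk; exact Bool.noConfusion htk
      have hbc : b ≠ c := fun he => by rw [he, htc] at htb; exact Bool.noConfusion htb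
      have hkP : k ∈ P := by
        rcases List.mem_append.mp hkm with h | h
        · exact h
        · exact absurd (by simpa using h) hkc
      have hbP : b ∈ P := by
        rcases List.mem_append.mp hbm with h | h
        · exact h
        · exact absurd (by simpa using h) hbc
      exact ih.tail ⟨⟨htk, htb, hnb⟩, hkP, hbP⟩
  · exact pvConnP_mono (fun x hx => List.mem_append.mpr (Or.inl hx))
theorem pvConnP_snoc {t : PvCell → Bool} {P : List PvCell} {c : PvCell}
    (htc : t c = true) (hc : c ∉ P) {a b : PvCell} :
    pvConnP t (P ++ [c]) a b ↔
      (pvConnP t P a b ∨ (pvBcon t P c a ∧ pvBcon t P c b)) := by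
  constructor
  · intro h
    induction h with
    | refl => exact Or.inl Relation.ReflTransGen.refl
    | tail h1 hadj ih =>
      rename_i k b
      obtain ⟨⟨htk, htb, hnb⟩, hkm, hbm⟩ := hadj
      rcases List.mem_append.mp hkm with hkP | hkc
      · rcases List.mem_append.mp hbm with hbP | hbc
        · rcases ih with hPab | ⟨hba, hbk⟩
          · exact Or.inl (hPab.tail ⟨⟨htk, htb, hnb⟩, hkP, hbP⟩)
          · refine Or.inr ⟨hba, ?_⟩
            rcases hbk with rfl | ⟨n, hnP, htn, hnc, hconn⟩
            · exact absurd hkP hc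
            · exact Or.inr ⟨n, hnP, htn, hnc, hconn.tail ⟨⟨htk, htb, hnb⟩, hkP, hbP⟩⟩
        · have hbc' : b = c := by simpa using hbc
          rw [hbc'] at hnb
          rw [hbc']
          refine Or.inr ⟨?_, Or.inl rfl⟩
          rcases ih with hPak | ⟨hba, _⟩
          · exact Or.inr ⟨k, hkP, htk, hnb, pvConnP_symm hPak⟩
          · exact hba
      · have hkc' : k = c := by simpa using hkc
        rw [hkc'] at hnb ih
        rcases List.mem_append.mp hbm with hbP | hbc2
        · have hnbc : pvNb b c := pvNb_symm hnb
          refine Or.inr ⟨?_, Or.inr ⟨b, hbP, htb, hnbc, Relation.ReflTransGen.refl⟩⟩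
          rcases ih with hPac | ⟨hba, _⟩
          · rcases eq_or_ne a c with rfl | hne
            · exact Or.inl rfl
            · exact absurd (pvConnP_mem hPac hne).2.1 hc
          · exact hba
        · have hbc' : b = c := by simpa using hbc2
          rw [hbc']
          exact ih
  · intro h
    rcases h with hP | ⟨hba, hbb⟩
    · exact pvConnP_mono (fun x hx => List.mem_append.mpr (Or.inl hx)) hP
    · have key : ∀ x, pvBcon t P c x → pvConnP t (P ++ [c]) c x := by
        intro x hx
        rcases hx with rfl | ⟨n, hnP, htn, hnc, hconn⟩
        · exact Relation.ReflTransGen.refl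
        · exact Relation.ReflTransGen.head
            ⟨⟨htc, htn, pvNb_symm hnc⟩, List.mem_append.mpr (Or.inr (by simp)),
              List.mem_append.mpr (Or.inl hnP)⟩
            (pvConnP_mono (fun y hy => List.mem_append.mpr (Or.inl hy)) hconn)
      exact (pvConnP_symm (key a hba)).trans (key b hbb)

theorem mem_pvNeighbors {z y x zm ym xm : Int} {n : PvCell} :
    n ∈ pvNeighbors z y x zm ym xm ↔ pvInBox zm ym xm n ∧ pvNb (z, y, x) n := by
  obtain ⟨n1, n2, n3⟩ := n
  unfold pvNeighbors pvDeltas pvNb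
  simp only [List.mem_filterMap, List.mem_cons, List.not_mem_nil, or_false]
  constructor
  · rintro ⟨d, hd, hf⟩
    rcases hd with rfl | rfl | rfl | rfl | rfl | rfl <;>
      (simp only at hf
       split_ifs at hf with hc
       simp only [Option.some.injEq, Prod.mk.injEq] at hf
       exact ⟨by simp only [pvInBox]; omega, by omega⟩)
  · rintro ⟨hbox, hnb⟩
    simp only [pvInBox] at hbox
    rcases hnb with ⟨h1, h2, h3⟩ | ⟨h1, h2, h3⟩ | ⟨h1, h2, h3⟩ | ⟨h1, h2, h3⟩ | ⟨h1, h2, h3⟩ | ⟨h1, h2, h3⟩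
    · refine ⟨(1,0,0), by simp, ?_⟩
      simp only
      split_ifs with hc
      · simp only [Option.some.injEq, Prod.mk.injEq]; omega
      · exfalso; omega
    · refine ⟨(-1,0,0), by simp, ?_⟩
      simp only
      split_ifs with hc
      · simp only [Option.some.injEq, Prod.mk.injEq]; omega
      · exfalso; omega
    · refine ⟨(0,1,0), by simp, ?_⟩
      simp only
      split_ifs with hc
      · simp only [Option.some.injEq, Prod.mk.injEq]; omega
      · exfalso; omega
    · refine ⟨(0,-1,0), by simp, ?_⟩
      simp only
      split_ifs with hc
      · simp only [Option.some.injEq, Prod.mk.injEq]; omega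
      · exfalso; omega
    · refine ⟨(0,0,1), by simp, ?_⟩
      simp only
      split_ifs with hc
      · simp only [Option.some.injEq, Prod.mk.injEq]; omega
      · exfalso; omega
    · refine ⟨(0,0,-1), by simp, ?_⟩
      simp only
      split_ifs with hc
      · simp only [Option.some.injEq, Prod.mk.injEq]; omega
      · exfalso; omega

theorem pvMaskAt_eq_t {mask : List (List (List Bool))} {n : PvCell}
    (h : pvInBox (pvZM mask) (pvYM mask) (pvXM mask) n) :
    pvMaskAt mask n.1 n.2.1 n.2.2 = pvTB mask n := by
  unfold pvTB
  simp [decide_eq_true h]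

theorem pvT_inBox {mask : List (List (List Bool))} {a : PvCell} (h : pvTB mask a = true) :
    pvInBox (pvZM mask) (pvYM mask) (pvXM mask) a := by
  unfold pvTB at h
  rw [Bool.and_eq_true] at h
  exact of_decide_eq_true h.1

theorem pvSetAdd {s : List PvCell} {x : PvCell} (h : x ∉ s) :
    PySem.Set.add s x = s ++ [x] := by
  simp [PySem.Set.add, PySem.Set.contains, h]

theorem pvFilterDrop {C vis : List PvCell} {n : PvCell} (hn : n ∈ C) (hnv : n ∉ vis) :
    (C.filter (fun d => decide (d ∉ vis ++ [n]))).length + 1 ≤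
      (C.filter (fun d => decide (d ∉ vis))).length := by
  have he : C.filter (fun d => decide (d ∉ vis ++ [n])) =
      (C.filter (fun d => decide (d ∉ vis))).filter (fun d => decide (d ≠ n)) := by
    rw [List.filter_filter]
    refine List.filter_congr (fun x hx => ?_)
    by_cases h1 : x ∈ vis <;> by_cases h2 : x = n <;> simp [h1, h2, List.mem_append]
  rw [he]
  have hnf : n ∈ C.filter (fun d => decide (d ∉ vis)) := List.mem_filter.mpr ⟨hn, by simpa⟩
  have : ((C.filter (fun d => decide (d ∉ vis))).filter (fun d => decide (d ≠ n))).length <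
      (C.filter (fun d => decide (d ∉ vis))).length := by
    rw [← List.countP_eq_length_filter]
    exact List.countP_lt_length_iff.mpr ⟨n, hnf, by simp⟩
  omega

theorem pvBfsFold (mask : List (List (List Bool))) (ns : List PvCell) :
    ∀ (q vis : List PvCell),
      (∀ n ∈ ns, pvInBox (pvZM mask) (pvYM mask) (pvXM mask) n) →
      (∀ a ∈ q, a ∈ vis) → q.Nodup → vis.Nodup →
      ((∀ a ∈ vis, a ∈ (ns.foldl (pvBfsStep mask) (q, vis)).2) ∧
        (∀ a ∈ (ns.foldl (pvBfsStep mask) (q, vis)).2,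
          a ∈ vis ∨ (a ∈ ns ∧ pvTB mask a = true)) ∧
        (∀ n ∈ ns, pvTB mask n = true → n ∈ (ns.foldl (pvBfsStep mask) (q, vis)).2) ∧
        (∀ a ∈ (ns.foldl (pvBfsStep mask) (q, vis)).1,
          a ∈ q ∨ (a ∈ (ns.foldl (pvBfsStep mask) (q, vis)).2 ∧ a ∉ vis)) ∧
        (∀ a ∈ q, a ∈ (ns.foldl (pvBfsStep mask) (q, vis)).1) ∧
        (ns.foldl (pvBfsStep mask) (q, vis)).2.Nodup ∧
        (ns.foldl (pvBfsStep mask) (q, vis)).1.Nodup ∧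
        (∀ a ∈ (ns.foldl (pvBfsStep mask) (q, vis)).1, a ∈ (ns.foldl (pvBfsStep mask) (q, vis)).2) ∧
        (∀ a ∈ (ns.foldl (pvBfsStep mask) (q, vis)).2,
          a ∈ (ns.foldl (pvBfsStep mask) (q, vis)).1 ∨ a ∈ vis) ∧
        (∀ C : List PvCell, (∀ n ∈ ns, n ∈ C) →
          2 * (C.filter (fun d => decide (d ∉ (ns.foldl (pvBfsStep mask) (q, vis)).2))).length +
              (ns.foldl (pvBfsStep mask) (q, vis)).1.length ≤
            2 * (C.filter (fun d => decide (d ∉ vis))).length + q.length)) := by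
  induction ns with
  | nil =>
    intro q vis hbox hqv hnq hnv
    refine ⟨fun a ha => ha, fun a ha => Or.inl ha, fun n hn => absurd hn List.not_mem_nil,
      fun a ha => Or.inl ha, fun a ha => ha, hnv, hnq, hqv, fun a ha => Or.inr ha,
      fun C hC => le_refl _⟩
  | cons n ns ih =>
    intro q vis hbox hqv hnq hnv
    have hnbox := hbox n List.mem_cons_self
    by_cases hcond : pvMaskAt mask n.1 n.2.1 n.2.2 = true ∧ n ∉ vis
    · -- push
      have htn : pvTB mask n = true := by rw [← pvMaskAt_eq_t hnbox]; exact hcond.1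
      have hstep : pvBfsStep mask (q, vis) n = (q ++ [n], vis ++ [n]) := by
        unfold pvBfsStep
        rw [if_pos hcond, pvSetAdd hcond.2]
      rw [List.foldl_cons, hstep]
      have hnodq : (q ++ [n]).Nodup := by
        simp only [List.nodup_append, List.nodup_cons]
        refine ⟨hnq, by simp, fun a ha b hb => ?_⟩
        have : b = n := by simpa using hb
        subst this
        exact fun he => hcond.2 (he ▸ hqv a ha)
      have hnodv : (vis ++ [n]).Nodup := by
        simp only [List.nodup_append]
        refine ⟨hnv, by simp, fun a ha b hb => ?_⟩
        have : b = n := by simpa using hb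
        subst this
        exact fun he => hcond.2 (he ▸ ha)
      obtain ⟨i1, i2, i3, i4, i5, i6, i7, i8, i9, i10⟩ :=
        ih (q ++ [n]) (vis ++ [n]) (fun m hm => hbox m (List.mem_cons_of_mem _ hm))
          (by intro a ha; rcases List.mem_append.mp ha with h | h
              · exact List.mem_append.mpr (Or.inl (hqv a h))
              · exact List.mem_append.mpr (Or.inr h))
          hnodq hnodv
      refine ⟨?_, ?_, ?_, ?_, ?_, i6, i7, i8, ?_, ?_⟩
      · exact fun a ha => i1 a (List.mem_append.mpr (Or.inl ha))
      · intro a ha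
        rcases i2 a ha with h | h
        · rcases List.mem_append.mp h with h2 | h2
          · exact Or.inl h2
          · have : a = n := by simpa using h2
            exact Or.inr ⟨this ▸ List.mem_cons_self, this ▸ htn⟩
        · exact Or.inr ⟨List.mem_cons_of_mem _ h.1, h.2⟩
      · intro m hm htm
        rcases List.mem_cons.mp hm with rfl | h
        · exact i1 m (List.mem_append.mpr (Or.inr (by simp)))
        · exact i3 m h htm
      · intro a ha
        rcases i4 a ha with h | h
        · rcases List.mem_append.mp h with h2 | h2
          · exact Or.inl h2
          · have ha2 : a = n := by simpa using h2
            subst ha2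
            exact Or.inr ⟨i1 a (List.mem_append.mpr (Or.inr (by simp))), hcond.2⟩
        · exact Or.inr ⟨h.1, fun hav => h.2 (List.mem_append.mpr (Or.inl hav))⟩
      · exact fun a ha => i5 a (List.mem_append.mpr (Or.inl ha))
      · intro a ha
        rcases i9 a ha with h | h
        · exact Or.inl h
        · rcases List.mem_append.mp h with h2 | h2
          · exact Or.inr h2
          · have ha2 : a = n := by simpa using h2
            subst ha2
            exact Or.inl (i5 a (List.mem_append.mpr (Or.inr (by simp))))
      · intro C hC
        have h10 := i10 C (fun m hm => hC m (List.mem_cons_of_mem _ hm))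
        have hdrop := pvFilterDrop (hC n List.mem_cons_self) hcond.2
        simp only [List.length_append, List.length_cons, List.length_nil] at h10 ⊢
        omega
    · -- skip
      have hstep : pvBfsStep mask (q, vis) n = (q, vis) := by
        unfold pvBfsStep
        rw [if_neg hcond]
      rw [List.foldl_cons, hstep]
      obtain ⟨i1, i2, i3, i4, i5, i6, i7, i8, i9, i10⟩ :=
        ih q vis (fun m hm => hbox m (List.mem_cons_of_mem _ hm)) hqv hnq hnv
      refine ⟨i1, ?_, ?_, i4, i5, i6, i7, i8, i9, ?_⟩
      · intro a ha
        rcases i2 a ha with h | h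
        · exact Or.inl h
        · exact Or.inr ⟨List.mem_cons_of_mem _ h.1, h.2⟩
      · intro m hm htm
        rcases List.mem_cons.mp hm with rfl | h
        · have hmask : pvMaskAt mask m.1 m.2.1 m.2.2 = true := by
            rw [pvMaskAt_eq_t hnbox]; exact htm
          have hmv : m ∈ vis := by
            by_contra hmv
            exact hcond ⟨hmask, hmv⟩
          exact i1 m hmv
        · exact i3 m h htm
      · exact fun C hC => i10 C (fun m hm => hC m (List.mem_cons_of_mem _ hm))

theorem pvBfs_spec (mask : List (List (List Bool))) :
    ∀ (fuel : Nat) (q vis : List PvCell),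
      (∀ a ∈ q, a ∈ vis) → q.Nodup → vis.Nodup →
      (∀ a ∈ vis, pvTB mask a = true) →
      (∀ a ∈ vis, a ∉ q → ∀ b, pvAdjF (pvTB mask) a b → b ∈ vis) →
      ((∀ a ∈ vis, a ∈ pvBfs mask (pvZM mask) (pvYM mask) (pvXM mask) fuel q vis) ∧
        (∀ a ∈ pvBfs mask (pvZM mask) (pvYM mask) (pvXM mask) fuel q vis, pvTB mask a = true) ∧
        (pvBfs mask (pvZM mask) (pvYM mask) (pvXM mask) fuel q vis).Nodup ∧
        (∀ a ∈ pvBfs mask (pvZM mask) (pvYM mask) (pvXM mask) fuel q vis,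
          a ∈ vis ∨ ∃ s ∈ q, pvConnF (pvTB mask) s a) ∧
        (2 * ((pvCells (pvZM mask) (pvYM mask) (pvXM mask)).filter
            (fun d => decide (d ∉ vis))).length + q.length ≤ fuel →
          ∀ a ∈ pvBfs mask (pvZM mask) (pvYM mask) (pvXM mask) fuel q vis,
            ∀ b, pvAdjF (pvTB mask) a b →
              b ∈ pvBfs mask (pvZM mask) (pvYM mask) (pvXM mask) fuel q vis)) := by
  intro fuel
  induction fuel with
  | zero =>
    intro q vis hqv hnq hnv hT h3
    refine ⟨fun a ha => ha, hT, hnv, fun a ha => Or.inl ha, fun hfuel a ha b hadj => ?_⟩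
    have hq0 : q = [] := by
      cases q with
      | nil => rfl
      | cons c q' => simp at hfuel
    subst hq0
    exact h3 a ha (by simp) b hadj
  | succ fuel ih =>
    intro q vis hqv hnq hnv hT h3
    cases q with
    | nil =>
      refine ⟨fun a ha => ha, hT, hnv, fun a ha => Or.inl ha, fun hfuel a ha b hadj => ?_⟩
      exact h3 a ha (by simp) b hadj
    | cons c q' =>
      have hrw : pvBfs mask (pvZM mask) (pvYM mask) (pvXM mask) (fuel + 1) (c :: q') vis =
          pvBfs mask (pvZM mask) (pvYM mask) (pvXM mask) fuel
            (((pvNeighbors c.1 c.2.1 c.2.2 (pvZM mask) (pvYM mask) (pvXM mask)).foldl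
              (pvBfsStep mask) (q', vis)).1)
            (((pvNeighbors c.1 c.2.1 c.2.2 (pvZM mask) (pvYM mask) (pvXM mask)).foldl
              (pvBfsStep mask) (q', vis)).2) := rfl
      obtain ⟨i1, i2, i3, i4, i5, i6, i7, i8, i9, i10⟩ :=
        pvBfsFold mask (pvNeighbors c.1 c.2.1 c.2.2 (pvZM mask) (pvYM mask) (pvXM mask)) q' vis
          (fun m hm => (mem_pvNeighbors.mp hm).1)
          (fun a ha => hqv a (List.mem_cons_of_mem _ ha))
          (List.Nodup.of_cons hnq) hnv
      have hcvis : c ∈ vis := hqv c List.mem_cons_self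
      have htc : pvTB mask c = true := hT c hcvis
      have hT2 : ∀ a ∈ (((pvNeighbors c.1 c.2.1 c.2.2 (pvZM mask) (pvYM mask) (pvXM mask)).foldl
          (pvBfsStep mask) (q', vis))).2, pvTB mask a = true := by
        intro a ha
        rcases i2 a ha with h | h
        · exact hT a h
        · exact h.2
      have h32 : ∀ a ∈ (((pvNeighbors c.1 c.2.1 c.2.2 (pvZM mask) (pvYM mask) (pvXM mask)).foldl
          (pvBfsStep mask) (q', vis))).2,
          a ∉ (((pvNeighbors c.1 c.2.1 c.2.2 (pvZM mask) (pvYM mask) (pvXM mask)).foldl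
            (pvBfsStep mask) (q', vis))).1 →
          ∀ b, pvAdjF (pvTB mask) a b →
            b ∈ (((pvNeighbors c.1 c.2.1 c.2.2 (pvZM mask) (pvYM mask) (pvXM mask)).foldl
              (pvBfsStep mask) (q', vis))).2 := by
        intro a ha hanq b hadj
        rcases i9 a ha with h | h
        · exact absurd h hanq
        · rcases eq_or_ne a c with rfl | hac
          · have hbns : b ∈ pvNeighbors a.1 a.2.1 a.2.2 (pvZM mask) (pvYM mask) (pvXM mask) :=
              mem_pvNeighbors.mpr ⟨pvT_inBox hadj.2.1, hadj.2.2⟩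
            exact i3 b hbns hadj.2.1
          · have haq' : a ∉ q' := fun hq' => hanq (i5 a hq')
            have hanotq : a ∉ c :: q' := by
              intro hmem
              rcases List.mem_cons.mp hmem with h2 | h2
              · exact hac h2
              · exact haq' h2
            exact i1 b (h3 a h hanotq b hadj)
      obtain ⟨j1, j2, j3, j4, j5⟩ := ih _ _ i8 i7 i6 hT2 h32
      rw [hrw]
      refine ⟨fun a ha => j1 a (i1 a ha), j2, j3, ?_, ?_⟩
      · intro a ha
        rcases j4 a ha with h | h
        · rcases i2 a h with h2 | h2
          · exact Or.inl h2
          · refine Or.inr ⟨c, List.mem_cons_self, Relation.ReflTransGen.single ?_⟩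
            exact ⟨htc, h2.2, (mem_pvNeighbors.mp h2.1).2⟩
        · obtain ⟨s, hs, hconn⟩ := h
          rcases i4 s hs with h2 | h2
          · exact Or.inr ⟨s, List.mem_cons_of_mem _ h2, hconn⟩
          · rcases i2 s h2.1 with h3' | h3'
            · exact absurd h3' h2.2
            · refine Or.inr ⟨c, List.mem_cons_self, Relation.ReflTransGen.trans
                (Relation.ReflTransGen.single ⟨htc, h3'.2, (mem_pvNeighbors.mp h3'.1).2⟩) hconn⟩
      · intro hfuel
        refine j5 ?_
        have h10 := i10 (pvCells (pvZM mask) (pvYM mask) (pvXM mask))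
          (fun m hm => mem_pvCells.mpr (mem_pvNeighbors.mp hm).1)
        simp only [List.length_cons] at hfuel
        omega

theorem pvLt_asymm {a b : PvCell} (h1 : pvLt a b) (h2 : pvLt b a) : False := by
  unfold pvLt at h1 h2; omega

theorem pvPrefix_mem {zm ym xm : Int} {P rest : List PvCell} {c : PvCell}
    (hsplit : pvCells zm ym xm = P ++ c :: rest) {d : PvCell} :
    d ∈ P ↔ d ∈ pvCells zm ym xm ∧ pvLt d c := by
  have hpw := pvCells_pairwise zm ym xm
  rw [hsplit] at hpw
  have hcross := (List.pairwise_append.mp hpw).2.2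
  constructor
  · intro hd
    exact ⟨by rw [hsplit]; exact List.mem_append.mpr (Or.inl hd),
      hcross d hd c List.mem_cons_self⟩
  · rintro ⟨hdm, hlt⟩
    rw [hsplit] at hdm
    rcases List.mem_append.mp hdm with h | h
    · exact h
    · rcases List.mem_cons.mp h with rfl | h2
      · exact absurd hlt (pvLt_irrefl _)
      · have := List.rel_of_pairwise_cons (List.pairwise_append.mp hpw).2.1 h2
        exact absurd hlt (fun hlt => pvLt_asymm hlt this)

theorem pvAFold (mask : List (List (List Bool))) :
    ∀ (rest P vis : List PvCell) (count : Int),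
      pvCells (pvZM mask) (pvYM mask) (pvXM mask) = P ++ rest →
      (∀ d, d ∈ vis ↔ (pvTB mask d = true ∧
        ∃ p ∈ P, pvTB mask p = true ∧ pvConnF (pvTB mask) p d)) →
      vis.Nodup →
      count = (((P.filter (fun c => pvTB mask c && pvB (pvMinOf (pvTB mask) c))).length : Int)) →
      ((∀ d, d ∈ (rest.foldl (pvAStep mask (pvZM mask) (pvYM mask) (pvXM mask)) (vis, count)).1 ↔
          (pvTB mask d = true ∧
            ∃ p ∈ P ++ rest, pvTB mask p = true ∧ pvConnF (pvTB mask) p d)) ∧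
        (rest.foldl (pvAStep mask (pvZM mask) (pvYM mask) (pvXM mask)) (vis, count)).2 =
          ((((P ++ rest).filter
            (fun c => pvTB mask c && pvB (pvMinOf (pvTB mask) c))).length : Int))) := by
  intro rest
  induction rest with
  | nil =>
    intro P vis count hsplit hvis hnv hcount
    simp only [List.foldl_nil, List.append_nil]
    exact ⟨hvis, hcount⟩
  | cons c rest ih =>
    intro P vis count hsplit hvis hnv hcount
    have hsplit' : pvCells (pvZM mask) (pvYM mask) (pvXM mask) = (P ++ [c]) ++ rest := by
      rw [hsplit]; simp
    have hcmem : c ∈ pvCells (pvZM mask) (pvYM mask) (pvXM mask) := by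
      rw [hsplit]; exact List.mem_append.mpr (Or.inr List.mem_cons_self)
    have hcbox : pvInBox (pvZM mask) (pvYM mask) (pvXM mask) c := mem_pvCells.mp hcmem
    have hmask : pvMaskAt mask c.1 c.2.1 c.2.2 = pvTB mask c := pvMaskAt_eq_t hcbox
    rw [List.foldl_cons, show P ++ c :: rest = (P ++ [c]) ++ rest by simp]
    -- closedness of vis under adjacency (used twice)
    have hclosed : ∀ a ∈ vis, ∀ b, pvAdjF (pvTB mask) a b → b ∈ vis := by
      intro a ha b hadj
      obtain ⟨hta, p, hp, htp, hconn⟩ := (hvis a).mp ha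
      exact (hvis b).mpr ⟨hadj.2.1, p, hp, htp, hconn.tail hadj⟩
    by_cases htc : pvTB mask c = true
    · by_cases hcv : c ∈ vis
      · -- true cell already visited: skip, component already counted
        have hstep : pvAStep mask (pvZM mask) (pvYM mask) (pvXM mask) (vis, count) c =
            (vis, count) := by
          unfold pvAStep
          rw [if_pos (Or.inr hcv)]
        rw [hstep]
        refine ih (P ++ [c]) vis count hsplit' ?_ hnv ?_
        · intro d
          rw [hvis d]
          constructor
          · rintro ⟨htd, p, hp, htp, hconn⟩
            exact ⟨htd, p, List.mem_append.mpr (Or.inl hp), htp, hconn⟩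
          · rintro ⟨htd, p, hp, htp, hconn⟩
            rcases List.mem_append.mp hp with h | h
            · exact ⟨htd, p, h, htp, hconn⟩
            · have hpc : p = c := by simpa using h
              subst hpc
              obtain ⟨_, p2, hp2, htp2, hconn2⟩ := (hvis p).mp hcv
              exact ⟨htd, p2, hp2, htp2, hconn2.trans hconn⟩
        · rw [List.filter_append]
          have : List.filter (fun c => pvTB mask c && pvB (pvMinOf (pvTB mask) c)) [c] = [] := by
            obtain ⟨_, p, hp, htp, hconn⟩ := (hvis c).mp hcv
            have hplt : pvLt p c := ((pvPrefix_mem hsplit).mp hp).2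
            have hnmin : ¬ pvMinOf (pvTB mask) c := fun hmin => hmin p htp hconn hplt
            have : pvB (pvMinOf (pvTB mask) c) = false := by
              cases hb : pvB (pvMinOf (pvTB mask) c)
              · rfl
              · exact absurd ((pvB_iff _).mp hb) hnmin
            simp [this]
          rw [this, List.append_nil, hcount]
      · -- new component: BFS
        have hstep : pvAStep mask (pvZM mask) (pvYM mask) (pvXM mask) (vis, count) c =
            (pvBfs mask (pvZM mask) (pvYM mask) (pvXM mask)
              (2 * (pvZM mask * pvYM mask * pvXM mask).toNat + 1) [c]
              (PySem.Set.add vis c), count + 1) := by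
          unfold pvAStep
          rw [if_neg]
          push_neg
          exact ⟨by rw [hmask]; simp [htc], hcv⟩
        rw [hstep, pvSetAdd hcv]
        have hnv' : (vis ++ [c]).Nodup := by
          simp only [List.nodup_append]
          refine ⟨hnv, by simp, fun a ha b hb => ?_⟩
          have : b = c := by simpa using hb
          subst this
          exact fun he => hcv (he ▸ ha)
        obtain ⟨j1, j2, j3, j4, j5⟩ := pvBfs_spec mask
          (2 * (pvZM mask * pvYM mask * pvXM mask).toNat + 1) [c] (vis ++ [c])
          (by intro a ha; have : a = c := by simpa using ha
              subst this; exact List.mem_append.mpr (Or.inr (by simp)))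
          (by simp)
          hnv'
          (by intro a ha
              rcases List.mem_append.mp ha with h | h
              · exact ((hvis a).mp h).1
              · have : a = c := by simpa using h
                subst this; exact htc)
          (by intro a ha hanq b hadj
              have hac : a ≠ c := by
                intro he; subst he; exact hanq (by simp)
              have hav : a ∈ vis := by
                rcases List.mem_append.mp ha with h | h
                · exact h
                · exact absurd (by simpa using h) hac
              exact List.mem_append.mpr (Or.inl (hclosed a hav b hadj)))
        have hfuel : 2 * (((pvCells (pvZM mask) (pvYM mask) (pvXM mask)).filter
            (fun d => decide (d ∉ vis ++ [c]))).length) + ([c] : List PvCell).length ≤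
            2 * (pvZM mask * pvYM mask * pvXM mask).toNat + 1 := by
          have h1 := List.length_filter_le (fun d => decide (d ∉ vis ++ [c]))
            (pvCells (pvZM mask) (pvYM mask) (pvXM mask))
          have h2 := pvCells_length (pvZM mask) (pvYM mask) (pvXM mask)
          simp only [List.length_cons, List.length_nil]
          omega
        have hclosedR := j5 hfuel
        have hcR : c ∈ pvBfs mask (pvZM mask) (pvYM mask) (pvXM mask)
            (2 * (pvZM mask * pvYM mask * pvXM mask).toNat + 1) [c] (vis ++ [c]) :=
          j1 c (List.mem_append.mpr (Or.inr (by simp)))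
        refine ih (P ++ [c]) _ _ hsplit' ?_ j3 ?_
        · intro d
          constructor
          · intro hd
            refine ⟨j2 d hd, ?_⟩
            rcases j4 d hd with h | h
            · rcases List.mem_append.mp h with h2 | h2
              · obtain ⟨htd, p, hp, htp, hconn⟩ := (hvis d).mp h2
                exact ⟨p, List.mem_append.mpr (Or.inl hp), htp, hconn⟩
              · have : d = c := by simpa using h2
                subst this
                exact ⟨d, List.mem_append.mpr (Or.inr (by simp)), htc, Relation.ReflTransGen.refl⟩
            · obtain ⟨s, hs, hconn⟩ := h
              have : s = c := by simpa using hs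
              subst this
              exact ⟨s, List.mem_append.mpr (Or.inr (by simp)), htc, hconn⟩
          · rintro ⟨htd, p, hp, htp, hconn⟩
            rcases List.mem_append.mp hp with h | h
            · have hdv : d ∈ vis := (hvis d).mpr ⟨htd, p, h, htp, hconn⟩
              exact j1 d (List.mem_append.mpr (Or.inl hdv))
            · have : p = c := by simpa using h
              subst this
              exact pvClosed_reach hclosedR hcR hconn
        · rw [List.filter_append]
          have hmin : pvMinOf (pvTB mask) c := by
            intro d htd hconn hlt
            have hdm : d ∈ pvCells (pvZM mask) (pvYM mask) (pvXM mask) :=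
              mem_pvCells.mpr (pvT_inBox htd)
            have hdP : d ∈ P := (pvPrefix_mem hsplit).mpr ⟨hdm, hlt⟩
            exact hcv ((hvis c).mpr ⟨htc, d, hdP, htd, hconn⟩)
          have : List.filter (fun c => pvTB mask c && pvB (pvMinOf (pvTB mask) c)) [c] = [c] := by
            simp [htc, (pvB_iff _).mpr hmin]
          rw [this, hcount]
          simp
    · -- false cell: skip
      have hstep : pvAStep mask (pvZM mask) (pvYM mask) (pvXM mask) (vis, count) c =
          (vis, count) := by
        unfold pvAStep
        rw [if_pos (Or.inl (by rw [hmask]; simpa using htc))]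
      rw [hstep]
      have htcf : pvTB mask c = false := by simpa using htc
      refine ih (P ++ [c]) vis count hsplit' ?_ hnv ?_
      · intro d
        rw [hvis d]
        constructor
        · rintro ⟨htd, p, hp, htp, hconn⟩
          exact ⟨htd, p, List.mem_append.mpr (Or.inl hp), htp, hconn⟩
        · rintro ⟨htd, p, hp, htp, hconn⟩
          rcases List.mem_append.mp hp with h | h
          · exact ⟨htd, p, h, htp, hconn⟩
          · have : p = c := by simpa using h
            subst this
            rw [htcf] at htp
            exact absurd htp (by simp)
      · rw [List.filter_append]
        have : List.filter (fun c => pvTB mask c && pvB (pvMinOf (pvTB mask) c)) [c] = [] := by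
          simp [htcf]
        rw [this, List.append_nil, hcount]

theorem pvA_final (mask : List (List (List Bool))) :
    connected_components_3d mask =
      (((pvCells (pvZM mask) (pvYM mask) (pvXM mask)).filter
        (fun c => pvTB mask c && pvB (pvMinOf (pvTB mask) c))).length : Int) := by
  obtain ⟨_, h2⟩ := pvAFold mask (pvCells (pvZM mask) (pvYM mask) (pvXM mask)) [] [] 0
    (List.nil_append _).symm
    (fun d => by simp)
    List.nodup_nil
    (by simp)
  rw [List.nil_append] at h2
  have hnest : connected_components_3d mask =
      ((pvCells (pvZM mask) (pvYM mask) (pvXM mask)).foldl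
        (pvAStep mask (pvZM mask) (pvYM mask) (pvXM mask)) ([], 0)).2 := by
    unfold connected_components_3d pvCells pvZM pvYM pvXM
    simp only [List.foldl_flatMap, List.foldl_map]
    rfl
  rw [hnest, h2]

theorem pvLt_of_lt_of_le {a b c : PvCell} (h1 : pvLt a b) (h2 : pvCellLe b c = true) :
    pvLt a c := by
  unfold pvLt at h1 ⊢
  unfold pvCellLe at h2
  simp only [decide_eq_true_iff] at h2
  omega

theorem pvLookup_map (K : List PvCell) (g : PvCell → PvCell) (n : PvCell) :
    pvLookup (K.map (fun k => (k, g k))) n = if n ∈ K then some (g n) else none := by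
  induction K with
  | nil => simp [pvLookup]
  | cons a K ih =>
    by_cases han : a = n
    · subst han
      simp [pvLookup, List.find?_cons]
    · rw [List.map_cons]
      have : pvLookup ((a, g a) :: K.map (fun k => (k, g k))) n =
          pvLookup (K.map (fun k => (k, g k))) n := by
        unfold pvLookup
        rw [List.find?_cons_of_neg]
        simpa using han
      rw [this, ih]
      have h2 : ¬ n = a := fun h => han h.symm
      simp [h2]

theorem pvBnb_mem3 {zm ym xm : Int} {P rest : List PvCell} {c : PvCell}
    (hsplit : pvCells zm ym xm = P ++ c :: rest) {n : PvCell} :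
    (n ∈ P ∧ pvNb n c) ↔
      (n ∈ ([(c.1 - 1, c.2.1, c.2.2), (c.1, c.2.1 - 1, c.2.2), (c.1, c.2.1, c.2.2 - 1)] :
        List PvCell) ∧ n ∈ P) := by
  constructor
  · rintro ⟨hnP, hnb⟩
    refine ⟨?_, hnP⟩
    have hlt : pvLt n c := ((pvPrefix_mem hsplit).mp hnP).2
    obtain ⟨n1, n2, n3⟩ := n
    obtain ⟨c1, c2, c3⟩ := c
    unfold pvNb at hnb
    unfold pvLt at hlt
    simp only [List.mem_cons, List.not_mem_nil, or_false, Prod.mk.injEq] at hnb hlt ⊢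
    rcases hnb with ⟨h1, h2, h3⟩ | ⟨h1, h2, h3⟩ | ⟨h1, h2, h3⟩ | ⟨h1, h2, h3⟩ | ⟨h1, h2, h3⟩ | ⟨h1, h2, h3⟩
    · exact Or.inl ⟨by omega, by omega, by omega⟩
    · exfalso; omega
    · exact Or.inr (Or.inl ⟨by omega, by omega, by omega⟩)
    · exfalso; omega
    · exact Or.inr (Or.inr ⟨by omega, by omega, by omega⟩)
    · exfalso; omega
  · rintro ⟨hn3, hnP⟩
    refine ⟨hnP, ?_⟩
    obtain ⟨n1, n2, n3⟩ := n
    obtain ⟨c1, c2, c3⟩ := c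
    unfold pvNb
    simp only [List.mem_cons, List.not_mem_nil, or_false, Prod.mk.injEq] at hn3 ⊢
    rcases hn3 with ⟨h1, h2, h3⟩ | ⟨h1, h2, h3⟩ | ⟨h1, h2, h3⟩
    · exact Or.inl ⟨by omega, by omega, by omega⟩
    · exact Or.inr (Or.inr (Or.inl ⟨by omega, by omega, by omega⟩))
    · exact Or.inr (Or.inr (Or.inr (Or.inr (Or.inl ⟨by omega, by omega, by omega⟩))))

theorem pvFC_snoc (mask : List (List (List Bool))) {P rest : List PvCell} {c : PvCell}
    (hsplit : pvCells (pvZM mask) (pvYM mask) (pvXM mask) = P ++ c :: rest)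
    (htc : pvTB mask c = true)
    {nlsL : List PvCell}
    (hnls : ∀ v, v ∈ nlsL ↔ ∃ n, n ∈ P ∧ pvTB mask n = true ∧ pvNb n c ∧
      pvFC (pvTB mask) P n = v) :
    (pvFC (pvTB mask) (P ++ [c]) c = nlsL.foldl pvMin2 c) ∧
    (∀ k ∈ P, pvTB mask k = true →
      ((∃ n, n ∈ P ∧ pvTB mask n = true ∧ pvNb n c ∧ pvConnP (pvTB mask) P n k) →
        (pvFC (pvTB mask) P k ∈ nlsL ∧
          pvFC (pvTB mask) (P ++ [c]) k = nlsL.foldl pvMin2 c)) ∧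
      ((¬ ∃ n, n ∈ P ∧ pvTB mask n = true ∧ pvNb n c ∧ pvConnP (pvTB mask) P n k) →
        (pvFC (pvTB mask) P k ∉ nlsL ∧
          pvFC (pvTB mask) (P ++ [c]) k = pvFC (pvTB mask) P k))) := by
  set t := pvTB mask with ht
  have hnodup : (pvCells (pvZM mask) (pvYM mask) (pvXM mask)).Nodup :=
    pvCells_nodup _ _ _
  have hc : c ∉ P := by
    rw [hsplit] at hnodup
    intro hcP
    exact (List.disjoint_of_nodup_append hnodup) hcP List.mem_cons_self
  have hpw : (pvCells (pvZM mask) (pvYM mask) (pvXM mask)).Pairwise pvLt :=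
    pvCells_pairwise _ _ _
  have hsplit' : pvCells (pvZM mask) (pvYM mask) (pvXM mask) = (P ++ [c]) ++ rest := by
    rw [hsplit]; simp
  have hPpw : P.Pairwise pvLt := by
    rw [hsplit] at hpw
    exact (List.pairwise_append.mp hpw).1
  have hP'pw : (P ++ [c]).Pairwise pvLt := by
    rw [hsplit'] at hpw
    exact (List.pairwise_append.mp hpw).1
  obtain ⟨htmem, htle⟩ := pvFoldMin c nlsL
  set target := nlsL.foldl pvMin2 c with htg
  -- target is in P ++ [c], true, and backward-connected to c
  have htP' : target ∈ P ++ [c] ∧ t target = true ∧ pvBcon t P c target := by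
    rcases List.mem_cons.mp htmem with he | hv
    · exact ⟨List.mem_append.mpr (Or.inr (by simp [he])), he ▸ htc, he ▸ Or.inl rfl⟩
    · obtain ⟨n, hnP, htn, hnb, hfc⟩ := (hnls target).mp hv
      obtain ⟨hm, htm, hcm⟩ := pvFC_mem hnP htn
      rw [hfc] at hm htm hcm
      exact ⟨List.mem_append.mpr (Or.inl hm), htm,
        Or.inr ⟨n, hnP, htn, hnb, pvConnP_symm hcm⟩⟩
  -- any backward-connected true cell is not below target
  have hminY : ∀ y, pvBcon t P c y → t y = true → ¬ pvLt y target := by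
    intro y hBy hty hlt
    rcases hBy with rfl | ⟨n1, hn1, htn1, hnb1, hconn1⟩
    · exact (pvLe_iff_not_lt.mp (htle y List.mem_cons_self)) hlt
    · have hyP : y ∈ P := by
        rcases eq_or_ne n1 y with rfl | hne
        · exact hn1
        · exact (pvConnP_mem hconn1 hne).2.1
      have hfy : pvFC t P n1 = pvFC t P y := pvFC_congr hn1 htn1 hconn1
      have hvy : pvFC t P y ∈ nlsL := (hnls _).mpr ⟨n1, hn1, htn1, hnb1, hfy⟩
      have hle1 : pvCellLe target (pvFC t P y) = true := htle _ (List.mem_cons_of_mem _ hvy)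
      have := pvFC_min hPpw hyP hty (Relation.ReflTransGen.refl) 
      exact this (pvLt_of_lt_of_le hlt hle1)
  constructor
  · -- new cell c
    refine pvHeadD_min (hP'pw.filter _) ?_ ?_ c
    · refine pvFC_filter_mem.mpr ⟨htP'.1, htP'.2.1, ?_⟩
      exact (pvConnP_snoc htc hc).mpr (Or.inr ⟨htP'.2.2, Or.inl rfl⟩)
    · intro y hy hlt
      obtain ⟨hyP', hty, hconn⟩ := pvFC_filter_mem.mp hy
      rcases (pvConnP_snoc htc hc).mp hconn with h | h
      · rcases eq_or_ne y c with rfl | hne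
        · exact (pvLe_iff_not_lt.mp (htle y List.mem_cons_self)) hlt
        · exact hc (pvConnP_mem h hne).2.1
      · exact hminY y h.1 hty hlt
  · intro k hkP htk
    constructor
    · rintro ⟨n, hnP, htn, hnb, hconn⟩
      have hfk : pvFC t P k ∈ nlsL :=
        (hnls _).mpr ⟨n, hnP, htn, hnb, pvFC_congr hnP htn hconn⟩
      refine ⟨hfk, ?_⟩
      have hBk : pvBcon t P c k := Or.inr ⟨n, hnP, htn, hnb, hconn⟩
      refine pvHeadD_min (hP'pw.filter _) ?_ ?_ k
      · refine pvFC_filter_mem.mpr ⟨htP'.1, htP'.2.1, ?_⟩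
        exact (pvConnP_snoc htc hc).mpr (Or.inr ⟨htP'.2.2, hBk⟩)
      · intro y hy hlt
        obtain ⟨hyP', hty, hconn'⟩ := pvFC_filter_mem.mp hy
        rcases (pvConnP_snoc htc hc).mp hconn' with h | h
        · have hyP : y ∈ P := by
            rcases eq_or_ne y k with rfl | hne
            · exact hkP
            · exact (pvConnP_mem h hne).1
          have hle1 : pvCellLe target (pvFC t P k) = true :=
            htle _ (List.mem_cons_of_mem _ hfk)
          exact pvFC_min hPpw hyP hty h (pvLt_of_lt_of_le hlt hle1)
        · exact hminY y h.1 hty hlt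
    · intro hno
      have hfknot : pvFC t P k ∉ nlsL := by
        intro hmem
        obtain ⟨n, hnP, htn, hnb, hfc⟩ := (hnls _).mp hmem
        exact hno ⟨n, hnP, htn, hnb,
          (pvFC_iff hnP htn hkP htk).mp (hfc.trans rfl)⟩
      refine ⟨hfknot, ?_⟩
      have hnoBk : ¬ pvBcon t P c k := by
        rintro (rfl | ⟨n, hnP, htn, hnb, hconn⟩)
        · exact hc hkP
        · exact hno ⟨n, hnP, htn, hnb, hconn⟩
      have hfilter : (P ++ [c]).filter (fun d => t d && pvB (pvConnP t (P ++ [c]) d k)) =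
          P.filter (fun d => t d && pvB (pvConnP t P d k)) := by
        rw [List.filter_append]
        have h1 : List.filter (fun d => t d && pvB (pvConnP t (P ++ [c]) d k)) [c] = [] := by
          have : pvB (pvConnP t (P ++ [c]) c k) = false := by
            cases hb : pvB (pvConnP t (P ++ [c]) c k)
            · rfl
            · exfalso
              rcases (pvConnP_snoc htc hc).mp ((pvB_iff _).mp hb) with h | h
              · rcases eq_or_ne c k with rfl | hne
                · exact hc hkP
                · exact hc (pvConnP_mem h hne).1
              · exact hnoBk h.2
          simp [this]
        rw [h1, List.append_nil]
        refine List.filter_congr (fun d hd => ?_)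
        cases htd : t d
        · simp
        · simp only [Bool.true_and]
          refine pvB_congr ⟨fun hcn => ?_, fun hcn =>
            pvConnP_mono (fun x hx => List.mem_append.mpr (Or.inl hx)) hcn⟩
          rcases (pvConnP_snoc htc hc).mp hcn with h | h
          · exact h
          · exact absurd h.2 hnoBk
      unfold pvFC
      rw [hfilter]

theorem pvFC_snoc_notT {t : PvCell → Bool} {P : List PvCell} {c : PvCell}
    (htc : t c = false) (k : PvCell) : pvFC t (P ++ [c]) k = pvFC t P k := by
  unfold pvFC
  rw [List.filter_append]
  have h1 : List.filter (fun d => t d && pvB (pvConnP t (P ++ [c]) d k)) [c] = [] := by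
    simp [htc]
  rw [h1, List.append_nil]
  congr 1
  refine List.filter_congr (fun d hd => ?_)
  cases htd : t d
  · simp
  · simp only [Bool.true_and]
    exact pvB_congr (pvConnP_snoc_notT htc)

theorem pvBFold (mask : List (List (List Bool))) :
    ∀ (rest P : List PvCell),
      pvCells (pvZM mask) (pvYM mask) (pvXM mask) = P ++ rest →
      rest.foldl (pvBStep mask)
          ((P.filter (pvTB mask)).map (fun k => (k, pvFC (pvTB mask) P k))) =
        (((P ++ rest).filter (pvTB mask)).map
          (fun k => (k, pvFC (pvTB mask) (P ++ rest) k))) := by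
  intro rest
  induction rest with
  | nil =>
    intro P hsplit
    simp
  | cons c rest ih =>
    intro P hsplit
    have hsplit' : pvCells (pvZM mask) (pvYM mask) (pvXM mask) = (P ++ [c]) ++ rest := by
      rw [hsplit]; simp
    have hcmem : c ∈ pvCells (pvZM mask) (pvYM mask) (pvXM mask) := by
      rw [hsplit]; exact List.mem_append.mpr (Or.inr List.mem_cons_self)
    have hmask : pvMaskAt mask c.1 c.2.1 c.2.2 = pvTB mask c :=
      pvMaskAt_eq_t (mem_pvCells.mp hcmem)
    rw [List.foldl_cons, show P ++ c :: rest = (P ++ [c]) ++ rest by simp]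
    by_cases htc : pvTB mask c = true
    · -- true cell: merge labels through the backward neighbours
      have hnls : ∀ v, v ∈ PySem.Set.ofList
          (([(c.1 - 1, c.2.1, c.2.2), (c.1, c.2.1 - 1, c.2.2), (c.1, c.2.1, c.2.2 - 1)] :
            List PvCell).filterMap
            (pvLookup ((P.filter (pvTB mask)).map (fun k => (k, pvFC (pvTB mask) P k))))) ↔
          ∃ n, n ∈ P ∧ pvTB mask n = true ∧ pvNb n c ∧ pvFC (pvTB mask) P n = v := by
        intro v
        rw [PySem.Set.mem_ofList, List.mem_filterMap]
        constructor
        · rintro ⟨m, hm3, hlook⟩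
          rw [pvLookup_map] at hlook
          split_ifs at hlook with hmK
          · obtain ⟨hmP, htm⟩ := List.mem_filter.mp hmK
            have hnb := (pvBnb_mem3 hsplit).mpr ⟨hm3, hmP⟩
            exact ⟨m, hmP, htm, hnb.2, by simpa using hlook⟩
        · rintro ⟨n, hnP, htn, hnb, hfc⟩
          refine ⟨n, ((pvBnb_mem3 hsplit).mp ⟨hnP, hnb⟩).1, ?_⟩
          rw [pvLookup_map, if_pos (List.mem_filter.mpr ⟨hnP, htn⟩), hfc]
      obtain ⟨hnew, hold⟩ := pvFC_snoc mask hsplit htc hnls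
      have hstep : pvBStep mask
          ((P.filter (pvTB mask)).map (fun k => (k, pvFC (pvTB mask) P k))) c =
          (((P ++ [c]).filter (pvTB mask)).map
            (fun k => (k, pvFC (pvTB mask) (P ++ [c]) k))) := by
        unfold pvBStep
        rw [if_neg (by rw [hmask, htc]; simp)]
        dsimp only
        rw [List.filter_append, show List.filter (pvTB mask) [c] = [c] by simp [htc],
          List.map_append, List.map_map]
        congr 1
        · refine List.map_congr_left (fun k hk => ?_)
          obtain ⟨hkP, htk⟩ := List.mem_filter.mp hk
          simp only [Function.comp]
          by_cases hex : ∃ n, n ∈ P ∧ pvTB mask n = true ∧ pvNb n c ∧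
              pvConnP (pvTB mask) P n k
          · obtain ⟨hin, heq⟩ := (hold k hkP htk).1 hex
            rw [if_pos hin, heq]
          · obtain ⟨hnin, heq⟩ := (hold k hkP htk).2 hex
            rw [if_neg hnin, heq]
        · simp [hnew]
      rw [hstep]
      exact ih (P ++ [c]) hsplit'
    · -- false cell: nothing changes
      have hstep : pvBStep mask
          ((P.filter (pvTB mask)).map (fun k => (k, pvFC (pvTB mask) P k))) c =
          ((P.filter (pvTB mask)).map (fun k => (k, pvFC (pvTB mask) P k))) := by
        unfold pvBStep
        rw [if_pos (by rw [hmask]; simpa using htc)]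
      have htcf : pvTB mask c = false := by simpa using htc
      rw [hstep, show (P.filter (pvTB mask)).map (fun k => (k, pvFC (pvTB mask) P k)) =
          (((P ++ [c]).filter (pvTB mask)).map
            (fun k => (k, pvFC (pvTB mask) (P ++ [c]) k))) from ?_]
      · exact ih (P ++ [c]) hsplit'
      · rw [List.filter_append, show List.filter (pvTB mask) [c] = [] by simp [htcf],
          List.append_nil]
        exact (List.map_congr_left (fun k hk => by rw [pvFC_snoc_notT htcf])).symm
      
theorem pvConnF_to_P {mask : List (List (List Bool))} {a b : PvCell}
    (h : pvConnF (pvTB mask) a b) :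
    pvConnP (pvTB mask) (pvCells (pvZM mask) (pvYM mask) (pvXM mask)) a b := by
  induction h with
  | refl => exact Relation.ReflTransGen.refl
  | tail h1 hadj ih =>
    exact ih.tail ⟨hadj, mem_pvCells.mpr (pvT_inBox hadj.1),
      mem_pvCells.mpr (pvT_inBox hadj.2.1)⟩

theorem pvB_final (mask : List (List (List Bool))) :
    connected_components_3d_alt mask =
      ((((pvCells (pvZM mask) (pvYM mask) (pvXM mask)).filter (pvTB mask)).countP
        (fun k => decide (k = pvFC (pvTB mask)
          (pvCells (pvZM mask) (pvYM mask) (pvXM mask)) k))) : Int) := by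
  have hlab := pvBFold mask (pvCells (pvZM mask) (pvYM mask) (pvXM mask)) []
    (List.nil_append _).symm
  simp only [List.filter_nil, List.map_nil, List.nil_append] at hlab
  have hnest : connected_components_3d_alt mask =
      (((pvCells (pvZM mask) (pvYM mask) (pvXM mask)).foldl (pvBStep mask) []).countP
        (fun kv => kv.1 = kv.2) : Int) := by
    unfold connected_components_3d_alt pvCells pvZM pvYM pvXM
    simp only [List.foldl_flatMap, List.foldl_map]
    rfl
  rw [hnest, hlab, List.countP_map]
  congr 1

-- ===== VERDICT (by name: the statement is the Claim_ definition above) =====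
theorem connected_components_3d_spec : Claim_equal_connected_components_3d := by
  intro mask hdom hpre
  unfold Spec_connected_components_3d
  rw [pvA_final mask, pvB_final mask]
  have hnat : ((pvCells (pvZM mask) (pvYM mask) (pvXM mask)).filter
      (fun c => pvTB mask c && pvB (pvMinOf (pvTB mask) c))).length =
      (((pvCells (pvZM mask) (pvYM mask) (pvXM mask)).filter (pvTB mask)).countP
        (fun k => decide (k = pvFC (pvTB mask)
          (pvCells (pvZM mask) (pvYM mask) (pvXM mask)) k))) := by
    rw [List.countP_filter, ← List.countP_eq_length_filter]
    refine List.countP_congr (fun c hc => ?_)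
    cases htc : pvTB mask c
    · simp
    · simp only [Bool.and_true, Bool.true_and]
      have hpair := pvCells_pairwise (pvZM mask) (pvYM mask) (pvXM mask)
      have hiff : pvFC (pvTB mask) (pvCells (pvZM mask) (pvYM mask) (pvXM mask)) c = c ↔
          pvMinOf (pvTB mask) c := by
        rw [pvFC_self_iff hpair hc htc]
        constructor
        · intro h d htd hconn
          exact h d (mem_pvCells.mpr (pvT_inBox htd)) htd (pvConnF_to_P hconn)
        · intro h d hd htd hconn
          exact h d htd (pvConnP_toF hconn)
      constructor
      · intro hb
        rw [decide_eq_true_iff]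
        exact (hiff.mpr ((pvB_iff _).mp hb)).symm
      · intro hb
        exact (pvB_iff _).mpr (hiff.mp ((of_decide_eq_true hb).symm))
  exact_mod_cast hnat
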